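-- pv_equiv track=rewrite | github.com/v-nafiseh/Functions | task1.py | check
-- ===== SOURCE A (Python) =====
-- def digSum(n):
--     sum = 0
--
--     while n > 0 or sum > 9:
--
--         if n == 0:
--             n = sum
--             sum = 0
--
--         sum += n % 10
--         n //= 10
--
--     return sum
--
-- def check(number):
--     rep = {"ones": 0, "twos": 0}
--     for num in range(1, number):
--         sum_num = digSum(num)
--         if sum_num == 1:
--             rep["ones"] += 1
--         elif sum_num == 2:
--             rep["twos"] += 1
--
--     return rep
-- ===== SOURCE B (Python) =====
-- def check(number):
--     # Closed form: digital root of k (k>=1) is 1+(k-1)%9, so count residues mod 9 directly.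
--     m = number - 1  # count k in [1, m]
--     ones = (m - 1) // 9 + 1 if m >= 1 else 0
--     twos = (m - 2) // 9 + 1 if m >= 2 else 0
--     return {"ones": ones, "twos": twos}
-- ===== Notes on version B (the rewrite author's own statement) =====
-- stated objective: faster
-- what changed: Replaces the per-number loop with repeated digit-sum computation by a closed-form count of residues mod 9 (digital root of k is 1+(k-1)%9).
import Mathlib
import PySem

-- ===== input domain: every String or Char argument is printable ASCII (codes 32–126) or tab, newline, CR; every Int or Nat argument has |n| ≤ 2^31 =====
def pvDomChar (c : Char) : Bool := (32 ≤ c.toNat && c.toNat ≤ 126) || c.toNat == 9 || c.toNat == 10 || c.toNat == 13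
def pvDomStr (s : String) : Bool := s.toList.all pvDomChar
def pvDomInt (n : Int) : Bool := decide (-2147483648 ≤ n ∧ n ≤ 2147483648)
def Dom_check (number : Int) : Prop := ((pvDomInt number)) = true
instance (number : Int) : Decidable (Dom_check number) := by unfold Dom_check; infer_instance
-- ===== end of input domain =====

-- B replaces A's per-number loop (each with an inner digit-sum loop) by a closed-form
-- count of residues mod 9, using that the digital root of k ≥ 1 is 1 + (k-1) % 9.

-- ===== PORT A =====
-- while n > 0 or sum > 9: … ; the 0 ≤ n ∧ 0 ≤ sum guard only makes the recursion total
-- (digSum is only called with n ≥ 1, and then both stay nonnegative, exactly as in Python).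
def digSumLoop (n s : Int) : Int :=
  if h : 0 ≤ n ∧ 0 ≤ s ∧ (0 < n ∨ 9 < s) then
    -- if n == 0: n = sum; sum = 0
    let n1 : Int := if n = 0 then s else n
    let s1 : Int := if n = 0 then 0 else s
    -- sum += n % 10 ; n //= 10
    digSumLoop (PySem.Int.floordiv n1 10) (s1 + PySem.Int.mod n1 10)
  else s
termination_by (9 * n + s).toNat
decreasing_by
  obtain ⟨hn, hs, hc⟩ := h
  have h1 : (if n = 0 then s else n) > 0 := by split <;> omega
  rw [PySem.Int.floordiv_eq_ediv_of_pos (by omega), PySem.Int.mod_eq_emod_of_pos (by omega)]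
  have := Int.emod_emod_of_dvd n (by norm_num : (10:Int) ∣ 10)
  split <;> omega

def digSum (n : Int) : Int := digSumLoop n 0

def check (number : Int) : List (String × Int) :=
  let rep : PySem.Dict String Int := PySem.Dict.ofList [("ones", 0), ("twos", 0)]
  let rep := (PySem.List.pyRange 1 number 1).foldl (fun rep num =>
      let sum_num := digSum num
      if sum_num = 1 then rep.modify "ones" 0 (· + 1)
      else if sum_num = 2 then rep.modify "twos" 0 (· + 1)
      else rep) rep
  rep.items

-- ===== PORT B =====
def check_alt (number : Int) : List (String × Int) :=
  let m := number - 1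
  let ones : Int := if 1 ≤ m then PySem.Int.floordiv (m - 1) 9 + 1 else 0
  let twos : Int := if 2 ≤ m then PySem.Int.floordiv (m - 2) 9 + 1 else 0
  [("ones", ones), ("twos", twos)]

-- ===== PRECONDITION & SPEC =====
def Spec_check (number : Int) (out : List (String × Int)) : Prop := out = check_alt number
instance (number : Int) (out : List (String × Int)) : Decidable (Spec_check number out) := by unfold Spec_check; infer_instance

-- ===== CLAIM (what is proved, stated in full; the proofs are below) =====
def Claim_equal_check : Prop := ∀ (number : Int), Dom_check number → Spec_check number (check number)

-- ===== LEMMAS AND PROOFS =====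

-- digital root: the inner while loop computes 1 + (n+s-1) % 9 on its reachable states
theorem digSumLoop_eq (n s : Int) (hn : 0 ≤ n) (hs : 0 ≤ s) (hpos : 0 < n + s) :
    digSumLoop n s = 1 + (n + s - 1) % 9 := by
  by_cases hc : 0 < n ∨ 9 < s
  · rw [digSumLoop]
    simp only [dif_pos (⟨hn, hs, hc⟩ : 0 ≤ n ∧ 0 ≤ s ∧ (0 < n ∨ 9 < s))]
    have h1 : (if n = 0 then s else n) > 0 := by split <;> omega
    rw [PySem.Int.floordiv_eq_ediv_of_pos (by omega : (0:Int) < 10),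
        PySem.Int.mod_eq_emod_of_pos (by omega : (0:Int) < 10)]
    set n1 : Int := if n = 0 then s else n with hn1
    set s1 : Int := if n = 0 then 0 else s with hs1
    have key : digSumLoop (n1 / 10) (s1 + n1 % 10) = 1 + (n1 / 10 + (s1 + n1 % 10) - 1) % 9 :=
      have hm10 := Int.emod_nonneg n1 (by norm_num : (10:Int) ≠ 0)
      digSumLoop_eq (n1 / 10) (s1 + n1 % 10) (by omega) (by omega) (by omega)
    rw [key]
    -- n1 ≡ n1/10 + n1%10 (mod 9), and n1 + s1 = n + s
    have hdecomp : n1 = 10 * (n1 / 10) + n1 % 10 := (Int.ediv_add_emod n1 10).symm ▸ by omega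
    have h9 : (n1 / 10 + (s1 + n1 % 10) - 1) % 9 = (n + s - 1) % 9 := by
      have hns : n1 + s1 = n + s := by simp only [hn1, hs1]; split <;> omega
      omega
    rw [h9]
  · rw [digSumLoop]
    simp only [dif_neg (by tauto : ¬ (0 ≤ n ∧ 0 ≤ s ∧ (0 < n ∨ 9 < s)))]
    omega
termination_by (9 * n + s).toNat
decreasing_by
  have h1 : (if n = 0 then s else n) > 0 := by split <;> omega
  have := Int.emod_emod_of_dvd n (by norm_num : (10:Int) ∣ 10)
  have h2 := Int.ediv_add_emod (if n = 0 then s else n) 10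
  have h3 := Int.emod_nonneg (if n = 0 then s else n) (by norm_num : (10:Int) ≠ 0)
  have h4 : (if n = 0 then s else n) % 10 < 10 := Int.emod_lt_of_pos _ (by norm_num)
  split_ifs at * <;> omega

theorem digSum_eq (k : Int) (hk : 1 ≤ k) : digSum k = 1 + (k - 1) % 9 := by
  have := digSumLoop_eq k 0 (by omega) le_rfl (by omega)
  simpa [digSum] using this

-- the step function of A's loop
def stepA (rep : PySem.Dict String Int) (num : Int) : PySem.Dict String Int :=
  let sum_num := digSum num
  if sum_num = 1 then rep.modify "ones" 0 (· + 1)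
  else if sum_num = 2 then rep.modify "twos" 0 (· + 1)
  else rep

-- the fold keeps the shape {"ones": a, "twos": b} and adds the counts
theorem fold_stepA (l : List Int) : ∀ (a b : Int),
    l.foldl stepA (PySem.Dict.ofList [("ones", a), ("twos", b)]) =
      PySem.Dict.ofList [("ones", a + (l.countP (fun k => digSum k = 1) : Int)),
                         ("twos", b + (l.countP (fun k => digSum k = 2) : Int))] := by
  induction l with
  | nil => intro a b; simp [List.countP]
  | cons x xs ih =>
    intro a b
    simp only [List.foldl_cons]
    have hones : stepA (PySem.Dict.ofList [("ones", a), ("twos", b)]) x =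
        PySem.Dict.ofList [("ones", a + (if digSum x = 1 then 1 else 0)),
                           ("twos", b + (if digSum x = 2 then 1 else 0))] := by
      unfold stepA
      by_cases h1 : digSum x = 1
      · simp [h1]; rfl
      · by_cases h2 : digSum x = 2
        · simp [h1, h2]; rfl
        · simp [h1, h2]
    rw [hones, ih]
    have e1 : ((x :: xs).countP (fun k => digSum k = 1) : Int)
        = (if digSum x = 1 then 1 else 0) + (xs.countP (fun k => digSum k = 1) : Int) := by
      by_cases h : digSum x = 1 <;> simp [List.countP_cons, h] <;> push_cast <;> ring
    have e2 : ((x :: xs).countP (fun k => digSum k = 2) : Int)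
        = (if digSum x = 2 then 1 else 0) + (xs.countP (fun k => digSum k = 2) : Int) := by
      by_cases h : digSum x = 2 <;> simp [List.countP_cons, h] <;> push_cast <;> ring
    rw [e1, e2]
    congr 2 <;> ring_nf

-- closed-form residue count over range(1, 1+j)
theorem count_closed (j : Nat) :
    ((PySem.List.pyRange 1 (1 + (j:Int)) 1).countP (fun k => digSum k = 1) : Int)
      = (if 1 ≤ (j:Int) then ((j:Int) - 1) / 9 + 1 else 0) ∧
    ((PySem.List.pyRange 1 (1 + (j:Int)) 1).countP (fun k => digSum k = 2) : Int)
      = (if 2 ≤ (j:Int) then ((j:Int) - 2) / 9 + 1 else 0) := by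
  induction j with
  | zero => simp [PySem.List.pyRange_one_eq_nil]
  | succ j ih =>
    obtain ⟨ih1, ih2⟩ := ih
    have hsplit : PySem.List.pyRange 1 (1 + ((j:Int) + 1)) 1
        = PySem.List.pyRange 1 (1 + (j:Int)) 1 ++ [1 + (j:Int)] := by
      rw [show (1 + ((j:Int) + 1)) = (1 + (j:Int)) + 1 by ring]
      exact PySem.List.pyRange_one_succ_right (by omega : (1:Int) ≤ 1 + (j:Int))
    have hd := digSum_eq (1 + (j:Int)) (by omega)
    push_cast
    rw [show (1 + ((j:Int) + 1)) = 1 + (((j:Int)+1 : Int)) by push_cast; ring] at *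
    constructor
    · rw [show (1 : Int) + ((j:Int) + 1) = 1 + ((j:Int)) + 1 by ring,
          PySem.List.pyRange_one_succ_right (by omega : (1:Int) ≤ 1 + (j:Int))]
      rw [List.countP_append]
      push_cast
      rw [ih1]
      simp only [List.countP_singleton, hd]
      have h9 := Int.emod_nonneg ((j:Int)) (by norm_num : (9:Int) ≠ 0)
      have h9' : ((j:Int)) % 9 < 9 := Int.emod_lt_of_pos _ (by norm_num)
      by_cases hz : ((j:Int)) % 9 = 0
      · simp [show (1:Int) + ((1:Int) + (j:Int) - 1) % 9 = 1 by omega]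
        split_ifs <;> omega
      · have : (1:Int) + ((1:Int) + (j:Int) - 1) % 9 ≠ 1 := by omega
        simp [this]
        split_ifs <;> omega
    · rw [show (1 : Int) + ((j:Int) + 1) = 1 + ((j:Int)) + 1 by ring,
          PySem.List.pyRange_one_succ_right (by omega : (1:Int) ≤ 1 + (j:Int))]
      rw [List.countP_append]
      push_cast
      rw [ih2]
      simp only [List.countP_singleton, hd]
      have h9 := Int.emod_nonneg ((j:Int)) (by norm_num : (9:Int) ≠ 0)
      have h9' : ((j:Int)) % 9 < 9 := Int.emod_lt_of_pos _ (by norm_num)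
      by_cases hz : ((j:Int)) % 9 = 1
      · simp [show (1:Int) + ((1:Int) + (j:Int) - 1) % 9 = 2 by omega]
        split_ifs <;> omega
      · have : (1:Int) + ((1:Int) + (j:Int) - 1) % 9 ≠ 2 := by omega
        simp [this]
        split_ifs <;> omega

-- ===== VERDICT (by name: the statement is the Claim_ definition above) =====
theorem check_spec : Claim_equal_check := by
  intro number _
  unfold Spec_check check check_alt
  by_cases hn : number ≤ 1
  · rw [PySem.List.pyRange_one_eq_nil hn]
    simp only [List.foldl_nil]
    rw [PySem.Int.floordiv_eq_ediv_of_pos (by norm_num : (0:Int) < 9),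
        PySem.Int.floordiv_eq_ediv_of_pos (by norm_num : (0:Int) < 9)]
    simp only [if_neg (by omega : ¬ (1 ≤ number - 1)), if_neg (by omega : ¬ (2 ≤ number - 1))]
    rfl
  · obtain ⟨j, hj⟩ : ∃ j : Nat, number = 1 + (j:Int) := ⟨(number - 1).toNat, by omega⟩
    subst hj
    obtain ⟨c1, c2⟩ := count_closed j
    have := fold_stepA (PySem.List.pyRange 1 (1 + (j:Int)) 1) 0 0
    simp only [zero_add] at this
    show (List.foldl stepA _ _).items = _
    rw [this, c1, c2]
    have hm : (1:Int) + (j:Int) - 1 = (j:Int) := by ring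
    simp only [hm, PySem.Int.floordiv_eq_ediv_of_pos (show (0:Int) < 9 by norm_num)]
    rfl
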